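-- pv_equiv track=rewrite | github.com/ChandruMIT-o/Tournament-of-Strategies-MIT | strategies/ninja.py | ninja
-- ===== SOURCE A (Python) =====
-- def ninja(own, opp):
--
--     def alternating_booleans(length):
--       true_block = 11
--       false_block = 6
--       result = []
--       cycle = 0
--       while len(result) < length:
--         false_block -= 1
--
--         result.extend([True] * true_block)
--
--         result.extend([False] * (false_block + cycle))
--
--         cycle += 1
--         true_block = 11
--         false_block += 1
--
--
--       return result[:length]
--
--     length = len(own)
--
--     return alternating_booleans(length+1)[-1]
-- ===== SOURCE B (Python) =====
-- def ninja(own, opp):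
--     # block k (k = 0, 1, 2, ...) of A's pattern is 11 Trues followed by (5 + k)
--     # Falses; walk blocks subtracting their sizes until the index lands inside one.
--     n = len(own)
--     k = 0
--     while n >= 16 + k:
--         n -= 16 + k
--         k += 1
--     return n < 11
-- ===== Notes on version B (the rewrite author's own statement) =====
-- stated objective: alternative
-- what changed: Instead of materialising the whole True/False block list up to len(own)+1 and indexing its last element, B subtracts successive block sizes (16+k) from the index until it lands inside one block and returns whether the offset is in the True part.
import Mathlib
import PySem

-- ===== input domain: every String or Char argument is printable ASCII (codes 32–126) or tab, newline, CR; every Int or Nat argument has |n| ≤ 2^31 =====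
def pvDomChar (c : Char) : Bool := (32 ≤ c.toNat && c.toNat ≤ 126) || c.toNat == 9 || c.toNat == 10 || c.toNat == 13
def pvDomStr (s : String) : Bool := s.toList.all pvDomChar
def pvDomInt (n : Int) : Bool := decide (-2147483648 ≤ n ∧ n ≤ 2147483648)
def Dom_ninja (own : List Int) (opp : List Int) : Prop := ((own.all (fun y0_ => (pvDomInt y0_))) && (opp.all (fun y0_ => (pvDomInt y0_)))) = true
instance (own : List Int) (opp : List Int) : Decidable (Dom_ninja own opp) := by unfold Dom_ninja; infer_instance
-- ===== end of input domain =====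

-- B replaces A's block-list construction by cumulative block-size arithmetic on the index.


-- ===== PORT A =====
-- the while loop of alternating_booleans: each pass appends 11 Trues then
-- (false_block - 1 + cycle) Falses; false_block is decremented and restored each
-- pass, so it stays 6 at the loop head and the appended False count is 5 + cycle.
def ninjaLoop (length : Nat) (result : List Bool) (cycle : Nat) : List Bool :=
  if result.length < length then
    ninjaLoop length
      (result ++ List.replicate 11 true ++ List.replicate (5 + cycle) false)
      (cycle + 1)
  else result
termination_by length - result.length
decreasing_by simp; omega

def alternatingBooleans (length : Nat) : List Bool :=
  (ninjaLoop length [] 0).take length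

-- result[-1]; the list always has length ≥ 1 here, so the default is unreachable
def ninja (own : List Int) (opp : List Int) : Bool :=
  (PySem.List.pyGet? (alternatingBooleans (own.length + 1)) (-1)).getD false

-- ===== PORT B =====
def ninjaAltLoop (n : Nat) (k : Nat) : Bool :=
  if n ≥ 16 + k then ninjaAltLoop (n - (16 + k)) (k + 1) else decide (n < 11)
termination_by n
decreasing_by omega

def ninja_alt (own : List Int) (opp : List Int) : Bool :=
  ninjaAltLoop own.length 0

-- ===== PRECONDITION & SPEC =====
def Spec_ninja (own : List Int) (opp : List Int) (out : Bool) : Prop := out = ninja_alt own opp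
instance (own : List Int) (opp : List Int) (out : Bool) : Decidable (Spec_ninja own opp out) := by unfold Spec_ninja; infer_instance

-- ===== CLAIM (what is proved, stated in full; the proofs are below) =====
def Claim_equal_ninja : Prop := ∀ (own : List Int) (opp : List Int), Dom_ninja own opp → Spec_ninja own opp (ninja own opp)

-- ===== LEMMAS AND PROOFS =====

-- the loop only ever appends to result
theorem ninjaLoop_prefix (length : Nat) (result : List Bool) (cycle : Nat) (i : Nat)
    (h : i < result.length) : (ninjaLoop length result cycle)[i]? = result[i]? := by
  unfold ninjaLoop
  split
  · rw [ninjaLoop_prefix]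
    · rw [List.append_assoc, List.getElem?_append_left h]
    · simpa using Nat.lt_of_lt_of_le h (by simp)
  · rfl
termination_by length - result.length
decreasing_by simp; omega

theorem ninjaLoop_length (length : Nat) (result : List Bool) (cycle : Nat) :
    length ≤ (ninjaLoop length result cycle).length := by
  unfold ninjaLoop
  split
  · exact ninjaLoop_length _ _ _
  · omega
termination_by length - result.length
decreasing_by simp; omega

-- the value at index i (past the already-built prefix) is what B's loop computes
theorem ninjaLoop_get (length : Nat) (result : List Bool) (cycle : Nat) (i : Nat)
    (h1 : result.length ≤ i) (h2 : i < length) :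
    (ninjaLoop length result cycle)[i]? = some (ninjaAltLoop (i - result.length) cycle) := by
  unfold ninjaLoop
  rw [if_pos (Nat.lt_of_le_of_lt h1 h2)]
  set result' := result ++ List.replicate 11 true ++ List.replicate (5 + cycle) false with hr
  have hlen : result'.length = result.length + (16 + cycle) := by simp [hr]; omega
  by_cases hc : i < result'.length
  · -- i falls inside the newly appended block
    rw [ninjaLoop_prefix _ _ _ _ hc]
    have hofs : i - result.length < 16 + cycle := by omega
    rw [hr, List.append_assoc, List.getElem?_append_right h1]
    unfold ninjaAltLoop
    rw [if_neg (by omega)]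
    by_cases ht : i - result.length < 11
    · rw [List.getElem?_append_left (by simpa using ht)]
      rw [List.getElem?_replicate]
      simp [ht]
    · rw [List.getElem?_append_right (by simpa using ht)]
      simp only [List.length_replicate]
      rw [List.getElem?_replicate]
      simp [ht]; omega
  · -- i lies beyond: recurse; B's loop takes one step too
    rw [ninjaLoop_get _ _ _ _ (by omega) h2]
    have : i - result.length ≥ 16 + cycle := by omega
    conv_rhs => rw [ninjaAltLoop]
    rw [if_pos this]
    have heq : i - result'.length = i - result.length - (16 + cycle) := by omega
    rw [heq]
termination_by length - result.length
decreasing_by simp; omega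

-- ===== VERDICT (by name: the statement is the Claim_ definition above) =====
theorem ninja_spec : Claim_equal_ninja := by
  intro own opp _
  unfold Spec_ninja ninja ninja_alt alternatingBooleans
  have hlen := ninjaLoop_length (own.length + 1) [] 0
  have hget := ninjaLoop_get (own.length + 1) [] 0 own.length (by simp) (by omega)
  rw [PySem.List.pyGet?_neg_one, List.getLast?_eq_getElem?]
  have hlt : ((ninjaLoop (own.length + 1) [] 0).take (own.length + 1)).length = own.length + 1 := by
    simp; omega
  rw [hlt]
  simp only [Nat.add_sub_cancel]
  rw [List.getElem?_take_of_lt (by omega), hget]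
  simp
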